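-- pv_equiv track=rewrite | github.com/LaiXuanHieu/C-u-Tr-c-D-Li-u | Chuong6/6.8.py | is_valid_number
-- ===== SOURCE A (Python) =====
-- def is_valid_number(n):
--     """Kiểm tra xem số n có thỏa mãn điều kiện hay không"""
--     digits = str(n)
--     seen = set()
--
--     for digit in digits:
--         if digit > '5':  # Nếu có chữ số > 5 thì không hợp lệ
--             return False
--         if digit in seen:  # Nếu có chữ số lặp lại thì không hợp lệ
--             return False
--         seen.add(digit)
--
--     return True
-- ===== SOURCE B (Python) =====
-- def is_valid_number(n):
--     d = sorted(str(n))
--     if d and d[-1] > '5':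
--         return False
--     for i in range(1, len(d)):
--         if d[i] == d[i - 1]:
--             return False
--     return True
-- ===== Notes on version B (the rewrite author's own statement) =====
-- stated objective: alternative
-- what changed: Replaces the set-based single pass (membership in a growing 'seen' set plus per-char >'5' test) by sort-then-scan: sort the characters of str(n), reject if the last (maximal) character exceeds '5', and detect duplicates as equal adjacent characters in the sorted list.
import Mathlib
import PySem

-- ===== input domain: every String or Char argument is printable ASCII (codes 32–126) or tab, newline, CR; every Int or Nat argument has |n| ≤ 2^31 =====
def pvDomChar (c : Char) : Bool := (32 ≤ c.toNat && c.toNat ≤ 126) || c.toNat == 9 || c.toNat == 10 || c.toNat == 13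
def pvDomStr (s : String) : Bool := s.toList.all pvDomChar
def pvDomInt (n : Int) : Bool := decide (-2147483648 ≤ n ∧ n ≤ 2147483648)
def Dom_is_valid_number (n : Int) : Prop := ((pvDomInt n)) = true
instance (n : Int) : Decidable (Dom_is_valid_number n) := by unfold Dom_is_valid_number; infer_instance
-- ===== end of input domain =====

-- B replaces A's one pass with a growing 'seen' set by sort-then-adjacent-scan (alternative decomposition, same results).

-- ===== PORT A =====
-- the for-loop over the characters of str(n), carrying the 'seen' set
def pvLoopA : List Char → PySem.Set Char → Bool
  | [], _ => true
  | c :: rest, seen =>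
    if '5' < c then false
    else if PySem.Set.contains seen c then false
    else pvLoopA rest (PySem.Set.add seen c)

def is_valid_number (n : Int) : Bool :=
  pvLoopA (PySem.Int.toChars n) PySem.Set.empty

-- ===== PORT B =====
-- d and d[-1] > '5'
def pvLastGt5 : List Char → Bool
  | [] => false
  | [a] => decide ('5' < a)
  | _ :: b :: t => pvLastGt5 (b :: t)

-- for i in range(1, len(d)): if d[i] == d[i-1]: return False  (adjacent pairs)
def pvAdjDup : List Char → Bool
  | a :: b :: t => if b == a then true else pvAdjDup (b :: t)
  | _ => false

def is_valid_number_alt (n : Int) : Bool :=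
  let d := PySem.List.sorted (PySem.Int.toChars n) (fun c => c) false
  if pvLastGt5 d then false
  else !pvAdjDup d

-- ===== PRECONDITION & SPEC =====
def Spec_is_valid_number (n : Int) (out : Bool) : Prop := out = is_valid_number_alt n
instance (n : Int) (out : Bool) : Decidable (Spec_is_valid_number n out) := by unfold Spec_is_valid_number; infer_instance

-- ===== CLAIM (what is proved, stated in full; the proofs are below) =====
def Claim_equal_is_valid_number : Prop := ∀ (n : Int), Dom_is_valid_number n → Spec_is_valid_number n (is_valid_number n)

-- ===== LEMMAS AND PROOFS =====

theorem pvLoopA_iff (l : List Char) (seen : PySem.Set Char) :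
    pvLoopA l seen = true ↔ (∀ c ∈ l, ¬ '5' < c) ∧ l.Nodup ∧ ∀ c ∈ l, c ∉ seen := by
  induction l generalizing seen with
  | nil => simp [pvLoopA]
  | cons a t ih =>
    simp only [pvLoopA]
    split_ifs with h1 h2
    · simp only [Bool.false_eq_true, false_iff]
      intro ⟨hle, _, _⟩
      exact hle a (by simp) h1
    · simp only [Bool.false_eq_true, false_iff]
      intro ⟨_, _, hns⟩
      exact hns a (by simp) (by simpa [PySem.Set.contains_iff] using h2)
    · rw [ih]
      constructor
      · rintro ⟨hle, hnd, hns⟩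
        refine ⟨?_, ?_, ?_⟩
        · intro c hc
          rcases List.mem_cons.mp hc with rfl | hc
          · exact h1
          · exact hle c hc
        · refine List.nodup_cons.mpr ⟨fun ha => ?_, hnd⟩
          exact (hns a ha) (by simp [PySem.Set.mem_add])
        · intro c hc
          rcases List.mem_cons.mp hc with rfl | hc
          · simpa [PySem.Set.contains_iff] using h2
          · intro hmem
            exact hns c hc (by simp [PySem.Set.mem_add, hmem])
      · rintro ⟨hle, hnd, hns⟩
        have hand := List.nodup_cons.mp hnd
        refine ⟨fun c hc => hle c (by simp [hc]), hand.2, ?_⟩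
        intro c hc hmem
        rcases (PySem.Set.mem_add (s := seen) (x := a) (y := c)).mp hmem with h | h
        · exact hns c (by simp [hc]) h
        · exact hand.1 (h ▸ hc)

theorem pvLastGt5_iff (l : List Char) (hp : l.Pairwise (· ≤ ·)) :
    pvLastGt5 l = true ↔ ∃ c ∈ l, '5' < c := by
  induction l with
  | nil => simp [pvLastGt5]
  | cons a t ih =>
    cases t with
    | nil => simp [pvLastGt5]
    | cons b t' =>
      have hp' := (List.pairwise_cons.mp hp).2
      have hab : a ≤ b := (List.pairwise_cons.mp hp).1 b (by simp)
      rw [pvLastGt5, ih hp']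
      constructor
      · rintro ⟨c, hc, hgt⟩; exact ⟨c, by simp [hc], hgt⟩
      · rintro ⟨c, hc, hgt⟩
        rcases List.mem_cons.mp hc with rfl | hc
        · exact ⟨b, by simp, lt_of_lt_of_le hgt hab⟩
        · exact ⟨c, hc, hgt⟩

theorem pvAdjDup_iff (l : List Char) (hp : l.Pairwise (· ≤ ·)) :
    pvAdjDup l = false ↔ l.Nodup := by
  induction l with
  | nil => simp [pvAdjDup]
  | cons a t ih =>
    cases t with
    | nil => simp [pvAdjDup]
    | cons b t' =>
      have hpc := List.pairwise_cons.mp hp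
      have hp' := hpc.2
      have hab : a ≤ b := hpc.1 b (by simp)
      have hbt : ∀ x ∈ t', b ≤ x := fun x hx => (List.pairwise_cons.mp hp').1 x hx
      rw [pvAdjDup]
      split_ifs with hba
      · simp only [Bool.true_eq_false, false_iff]
        intro hnd
        exact (List.nodup_cons.mp hnd).1 (by simp [(beq_iff_eq.mp hba).symm])
      · rw [ih hp']
        have hne : a ≠ b := fun h => hba (beq_iff_eq.mpr h.symm)
        have halt : a < b := lt_of_le_of_ne hab hne
        constructor
        · intro hnd
          refine List.nodup_cons.mpr ⟨?_, hnd⟩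
          intro hmem
          rcases List.mem_cons.mp hmem with rfl | hmem
          · exact hne rfl
          · exact absurd (lt_of_lt_of_le halt (hbt a hmem)) (lt_irrefl a)
        · exact fun hnd => (List.nodup_cons.mp hnd).2

-- ===== VERDICT (by name: the statement is the Claim_ definition above) =====
theorem is_valid_number_spec : Claim_equal_is_valid_number := by
  intro n _
  unfold Spec_is_valid_number is_valid_number is_valid_number_alt
  set l := PySem.Int.toChars n with hl
  set d := PySem.List.sorted l (fun c => c) false with hd
  have hperm : d.Perm l := PySem.List.sorted_perm l (fun c => c) false
  have hpw : d.Pairwise (· ≤ ·) := by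
    simpa using PySem.List.sorted_pairwise (xs := l) (key := fun c => c)
  rw [Bool.eq_iff_iff]
  rw [pvLoopA_iff]
  constructor
  · rintro ⟨hle, hnd, _⟩
    rw [if_neg, Bool.not_eq_true', (pvAdjDup_iff d hpw).mpr (hperm.nodup_iff.mpr hnd)]
    intro hlast
    obtain ⟨c, hc, hgt⟩ := (pvLastGt5_iff d hpw).mp hlast
    exact hle c (hperm.mem_iff.mp hc) hgt
  · intro hb
    by_cases hlast : pvLastGt5 d = true
    · rw [if_pos hlast] at hb; exact absurd hb (by simp)
    · rw [if_neg hlast, Bool.not_eq_true'] at hb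
      refine ⟨?_, hperm.nodup_iff.mp ((pvAdjDup_iff d hpw).mp hb), by simp [PySem.Set.empty]⟩
      intro c hc hgt
      exact hlast ((pvLastGt5_iff d hpw).mpr ⟨c, hperm.mem_iff.mpr hc, hgt⟩)
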